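-- pv_equiv track=rewrite | github.com/Siddhartha-Devan/Advent-of-Code-2023 | day3/adv of code.py | num_checker
-- ===== SOURCE A (Python) =====
-- def num_checker(data, ind, number = ''):
--     if ind <len(data):
--         if data[ind].isnumeric():
--             return num_checker(data, ind+1, number+data[ind])
--         else:
--             return number, ind+1
--     else:
--         return number, ind+1
-- ===== SOURCE B (Python) =====
-- def num_checker(data, ind, number=''):
--     j = ind
--     while j < len(data) and data[j].isnumeric():
--         j += 1
--     return number + ''.join(data[k] for k in range(ind, j)), j + 1
-- ===== Notes on version B (the rewrite author's own statement) =====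
-- stated objective: alternative
-- what changed: Replaces A's recursion that threads a growing string accumulator through every call with a two-phase version: first scan only for the stop index j, then build the result in one shot from data[ind:j] and return (number+digits, j+1).
import Mathlib
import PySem

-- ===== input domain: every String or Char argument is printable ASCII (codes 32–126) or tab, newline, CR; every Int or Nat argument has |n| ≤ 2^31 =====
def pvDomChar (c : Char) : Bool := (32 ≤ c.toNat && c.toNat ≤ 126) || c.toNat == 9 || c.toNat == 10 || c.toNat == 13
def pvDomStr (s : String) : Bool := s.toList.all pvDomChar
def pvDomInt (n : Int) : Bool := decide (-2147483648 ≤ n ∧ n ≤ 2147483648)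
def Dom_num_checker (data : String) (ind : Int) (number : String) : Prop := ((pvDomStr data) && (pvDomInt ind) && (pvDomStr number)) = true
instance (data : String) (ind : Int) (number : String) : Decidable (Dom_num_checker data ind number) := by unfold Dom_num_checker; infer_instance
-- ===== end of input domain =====

-- B replaces A's accumulator-threading recursion by a two-phase scan: find the stop index, then
-- build the digit string in one shot from data[ind:j] (alternative decomposition, same cost).

-- ===== PORT A =====
-- A's recursion: if ind < len(data) then (if data[ind].isnumeric() then recurse with number+data[ind]
-- else return) else return.  On the ASCII domain str.isnumeric agrees with PySem.Chars.isdigit.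
def num_checker (data : String) (ind : Int) (number : String) : String × Int :=
  if ind < (data.toList.length : Int) then
    match PySem.Str.pyGet? data ind with
    | some c =>
        if PySem.Chars.isdigit c then
          num_checker data (ind + 1) (number.push c)
        else (number, ind + 1)
    | none => (number, ind + 1)   -- IndexError in Python (ind < -len); excluded by Pre_
  else (number, ind + 1)
termination_by ((data.toList.length : Int) - ind).toNat
decreasing_by omega

-- ===== PORT B =====
-- B's phase 1: the 'while j < len(data) and data[j].isnumeric(): j += 1' loop; returns only j.
def stopIdx (data : String) (j : Int) : Int :=
  if j < (data.toList.length : Int) then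
    match PySem.Str.pyGet? data j with
    | some c => if PySem.Chars.isdigit c then stopIdx data (j + 1) else j
    | none => j   -- IndexError in Python (j < -len); excluded by Pre_
  else j
termination_by ((data.toList.length : Int) - j).toNat
decreasing_by omega

-- B's phase 2: ''.join(data[k] for k in range(ind, j)), returned with j + 1.
def num_checker_alt (data : String) (ind : Int) (number : String) : String × Int :=
  let j := stopIdx data ind
  (number ++ String.ofList ((PySem.List.pyRange ind j 1).filterMap (fun k => PySem.Str.pyGet? data k)), j + 1)

-- ===== PRECONDITION & SPEC =====
-- Pre_ excludes exactly ind < -len(data), where Python A raises IndexError on data[ind].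
def Pre_num_checker (data : String) (ind : Int) (number : String) : Prop :=
  -((data.toList.length : Int)) ≤ ind
instance (data : String) (ind : Int) (number : String) : Decidable (Pre_num_checker data ind number) := by unfold Pre_num_checker; infer_instance
def pvWitness_num_checker : String × Int × String := ("12a", 0, "")
def Spec_num_checker (data : String) (ind : Int) (number : String) (out : String × Int) : Prop := out = num_checker_alt data ind number
instance (data : String) (ind : Int) (number : String) (out : String × Int) : Decidable (Spec_num_checker data ind number out) := by unfold Spec_num_checker; infer_instance

-- ===== CLAIM (what is proved, stated in full; the proofs are below) =====
def Claim_equal_num_checker : Prop := ∀ (data : String) (ind : Int) (number : String), Dom_num_checker data ind number → Pre_num_checker data ind number → Spec_num_checker data ind number (num_checker data ind number)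

-- ===== LEMMAS AND PROOFS =====

theorem le_stopIdx (data : String) (j : Int) : j ≤ stopIdx data j := by
  induction j using stopIdx.induct data with
  | case1 j hlt c hget hdig ih =>
      rw [stopIdx, if_pos hlt, hget]; simp only [hdig, if_true]; omega
  | case2 j hlt c hget hdig =>
      rw [stopIdx, if_pos hlt, hget]; simp [hdig]
  | case3 j hlt hget => rw [stopIdx, if_pos hlt, hget]
  | case4 j hlt => rw [stopIdx, if_neg hlt]

theorem push_append_mk (s : String) (c : Char) (l : List Char) :
    s ++ String.ofList (c :: l) = (s.push c) ++ String.ofList l := by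
  apply String.ext
  simp [String.toList_ofList]

theorem num_checker_eq_alt (data : String) (ind : Int) (number : String) :
    num_checker data ind number = num_checker_alt data ind number := by
  induction ind, number using num_checker.induct data with
  | case1 ind number hlt c hget hdig ih =>
      rw [num_checker, if_pos hlt, hget]
      simp only [hdig, if_true, ih]
      unfold num_checker_alt
      dsimp only
      have hstop : stopIdx data ind = stopIdx data (ind + 1) := by
        conv_lhs => rw [stopIdx, if_pos hlt, hget]
        simp [hdig]
      have hle : ind + 1 ≤ stopIdx data (ind + 1) := le_stopIdx data (ind + 1)
      have hcons : PySem.List.pyRange ind (stopIdx data (ind + 1)) 1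
          = ind :: PySem.List.pyRange (ind + 1) (stopIdx data (ind + 1)) 1 :=
        PySem.List.pyRange_one_cons (by omega)
      rw [hstop, hcons]
      simp only [List.filterMap_cons, hget, push_append_mk]
  | case2 ind number hlt c hget hdig =>
      rw [num_checker, if_pos hlt, hget]
      simp only [hdig, if_false, Bool.false_eq_true]
      unfold num_checker_alt
      dsimp only
      have hstop : stopIdx data ind = ind := by
        rw [stopIdx, if_pos hlt, hget]; simp [hdig]
      rw [hstop, PySem.List.pyRange_one_eq_nil le_rfl]
      simp
  | case3 ind number hlt hget =>
      rw [num_checker, if_pos hlt, hget]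
      unfold num_checker_alt
      dsimp only
      have hstop : stopIdx data ind = ind := by rw [stopIdx, if_pos hlt, hget]
      rw [hstop, PySem.List.pyRange_one_eq_nil le_rfl]
      simp
  | case4 ind number hlt =>
      rw [num_checker, if_neg hlt]
      unfold num_checker_alt
      dsimp only
      have hstop : stopIdx data ind = ind := by rw [stopIdx, if_neg hlt]
      rw [hstop, PySem.List.pyRange_one_eq_nil le_rfl]
      simp

-- ===== VERDICT (by name: the statement is the Claim_ definition above) =====
theorem num_checker_spec : Claim_equal_num_checker := by
  intro data ind number _ _
  exact num_checker_eq_alt data ind number
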